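-- pv_equiv track=rewrite | github.com/jonathandunn/c2xg | c2xg/modules/process_input.py | create_category_index
-- ===== SOURCE A (Python) =====
-- def create_category_index(category_dictionary):
--
-- 	category_index = []
--
-- 	for word in category_dictionary.keys():
-- 		if category_dictionary[word] not in category_index:
-- 			category_index.append(category_dictionary[word])
--
-- 	category_index = sorted(category_index)
--
-- 	category_index.insert(0, "n/a")
--
-- 	return category_index
-- ===== SOURCE B (Python) =====
-- def create_category_index(category_dictionary):
--     category_index = ["n/a"]
--     prev = None
--     have_prev = False
--     for value in sorted(category_dictionary.values()):
--         if not have_prev or value != prev: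
--             category_index.append(value)
--             prev = value
--             have_prev = True
--     return category_index
-- ===== Notes on version B (the rewrite author's own statement) =====
-- stated objective: faster
-- what changed: Sort the dict values first and deduplicate in one adjacent-comparison pass, instead of deduplicating with a per-element O(n) membership scan over a growing list and sorting afterwards.
import Mathlib
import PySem

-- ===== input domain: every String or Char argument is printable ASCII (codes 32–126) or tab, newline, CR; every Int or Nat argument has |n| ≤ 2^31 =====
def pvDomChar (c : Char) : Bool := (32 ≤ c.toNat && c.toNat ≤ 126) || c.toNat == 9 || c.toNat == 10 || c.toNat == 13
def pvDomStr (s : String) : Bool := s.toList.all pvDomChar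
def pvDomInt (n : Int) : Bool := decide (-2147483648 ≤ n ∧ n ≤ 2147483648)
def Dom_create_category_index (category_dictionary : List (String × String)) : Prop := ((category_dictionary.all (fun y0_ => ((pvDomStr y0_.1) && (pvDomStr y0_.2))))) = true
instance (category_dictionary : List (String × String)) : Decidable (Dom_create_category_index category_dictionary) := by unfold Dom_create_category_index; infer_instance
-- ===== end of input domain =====

-- B sorts the dict values first and removes duplicates in one adjacent-comparison pass
-- (O(n log n)) instead of A's per-element membership scan over a growing list (O(n^2)).

-- ===== PORT A =====
-- dict keys are unique, so 'for word in d.keys(): v = d[word]' visits exactly d.items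
-- in order with v = item.2 (exact for a Python dict).
def create_category_index (category_dictionary : List (String × String)) : List String :=
  let d := PySem.Dict.ofList category_dictionary
  let category_index :=
    d.items.foldl (fun acc p => if p.2 ∈ acc then acc else acc ++ [p.2]) []
  let sorted_index := PySem.List.sorted category_index (fun x => x) false
  PySem.List.insert sorted_index 0 "n/a"


-- ===== PORT B =====
-- pvStepB is the body of Source B's loop, named so the proofs can refer to it
def pvStepB (st : List String × Option String × Bool) (value : String) :
    List String × Option String × Bool :=
  if !st.2.2 || st.2.1 ≠ some value then (st.1 ++ [value], some value, true) else st

def create_category_index_alt (category_dictionary : List (String × String)) : List String :=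
  let d := PySem.Dict.ofList category_dictionary
  let ordered := PySem.List.sorted d.values (fun x => x) false
  (ordered.foldl pvStepB (["n/a"], none, false)).1

-- ===== PRECONDITION & SPEC =====
def Spec_create_category_index (category_dictionary : List (String × String)) (out : List String) : Prop := out = create_category_index_alt category_dictionary
instance (category_dictionary : List (String × String)) (out : List String) : Decidable (Spec_create_category_index category_dictionary out) := by unfold Spec_create_category_index; infer_instance

-- ===== CLAIM (what is proved, stated in full; the proofs are below) =====
def Claim_equal_create_category_index : Prop := ∀ (category_dictionary : List (String × String)), Dom_create_category_index category_dictionary → Spec_create_category_index category_dictionary (create_category_index category_dictionary)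

-- ===== LEMMAS AND PROOFS =====

-- adjacent dedup of B, as a structural recursion (prev as Option)
def pvAdj : List String → Option String → List String
  | [], _ => []
  | v :: t, p => if p = some v then pvAdj t p else v :: pvAdj t (some v)

theorem pvAdj_cons (v : String) (t : List String) (p : Option String) :
    pvAdj (v :: t) p = if p = some v then pvAdj t p else v :: pvAdj t (some v) := rfl

theorem pvFoldB (l : List String) (r : List String) (p : Option String) :
    (l.foldl pvStepB (r, p, true)).1 = r ++ pvAdj l p := by
  induction l generalizing r p with
  | nil => simp [pvAdj]
  | cons v t ih =>
    rw [List.foldl_cons, pvAdj_cons]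
    by_cases h : p = some v
    · have : pvStepB (r, p, true) v = (r, p, true) := by
        simp [pvStepB, h]
      rw [this, if_pos h, ih]
    · have : pvStepB (r, p, true) v = (r ++ [v], some v, true) := by
        simp [pvStepB, h]
      rw [this, if_neg h, ih, List.append_assoc]
      rfl

theorem pvFoldB_none (l : List String) (r : List String) :
    (l.foldl pvStepB (r, none, false)).1 = r ++ pvAdj l none := by
  cases l with
  | nil => simp [pvAdj]
  | cons v t =>
    rw [List.foldl_cons]
    have : pvStepB (r, none, false) v = (r ++ [v], some v, true) := by
      simp [pvStepB]
    rw [this, pvFoldB, pvAdj_cons, if_neg (by simp), List.append_assoc]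
    rfl

-- pvAdj on a ≤-sorted list with a lower bound a
theorem pvAdj_some (l : List String) (a : String) (h : l.Pairwise (· ≤ ·))
    (ha : ∀ y ∈ l, a ≤ y) :
    (pvAdj l (some a)).Pairwise (· < ·) ∧
    (∀ x, x ∈ pvAdj l (some a) ↔ x ∈ l ∧ x ≠ a) ∧
    (∀ x ∈ pvAdj l (some a), a < x) := by
  induction l generalizing a with
  | nil => simp [pvAdj]
  | cons v t ih =>
    rcases List.pairwise_cons.mp h with ⟨hv, ht⟩
    rw [pvAdj_cons]
    by_cases hva : (some a : Option String) = some v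
    · have hv' : v = a := (Option.some_inj.mp hva).symm
      have ih' := ih a ht (by intro y hy; exact le_trans (ha v (by simp)) (hv y hy))
      rw [if_pos hva]
      refine ⟨ih'.1, ?_, ih'.2.2⟩
      intro x
      rw [ih'.2.1 x]
      constructor
      · rintro ⟨hx, hne⟩; exact ⟨by simp [hx], hne⟩
      · rintro ⟨hx, hne⟩
        rcases List.mem_cons.mp hx with rfl | hx
        · exact absurd hv' hne
        · exact ⟨hx, hne⟩
    · have hav : a ≠ v := fun e => hva (by rw [e])
      have halt : a < v := lt_of_le_of_ne (ha v (by simp)) hav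
      have ih' := ih v ht hv
      rw [if_neg hva]
      refine ⟨?_, ?_, ?_⟩
      · exact List.pairwise_cons.mpr ⟨fun y hy => ih'.2.2 y hy, ih'.1⟩
      · intro x
        simp only [List.mem_cons]
        constructor
        · rintro (rfl | hx)
          · exact ⟨Or.inl rfl, fun e => hav e.symm⟩
          · rcases (ih'.2.1 x).mp hx with ⟨hxt, hxv⟩
            refine ⟨Or.inr hxt, ?_⟩
            intro e; subst e
            exact absurd (le_antisymm (ha v (by simp)) (hv x hxt)) hav
        · rintro ⟨(rfl | hxt), hxa⟩
          · exact Or.inl rfl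
          · by_cases hxv : x = v
            · exact Or.inl hxv
            · exact Or.inr ((ih'.2.1 x).mpr ⟨hxt, hxv⟩)
      · intro x hx
        rcases List.mem_cons.mp hx with rfl | hx
        · exact halt
        · exact lt_trans halt (ih'.2.2 x hx)

theorem pvAdj_none_lemma (l : List String) (h : l.Pairwise (· ≤ ·)) :
    (pvAdj l none).Pairwise (· < ·) ∧ ∀ x, x ∈ pvAdj l none ↔ x ∈ l := by
  cases l with
  | nil => simp [pvAdj]
  | cons v t =>
    rcases List.pairwise_cons.mp h with ⟨hv, ht⟩
    have h' := pvAdj_some t v ht hv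
    rw [pvAdj_cons, if_neg (by simp)]
    refine ⟨List.pairwise_cons.mpr ⟨fun y hy => h'.2.2 y hy, h'.1⟩, ?_⟩
    intro x
    simp only [List.mem_cons]
    constructor
    · rintro (rfl | hx)
      · exact Or.inl rfl
      · exact Or.inr ((h'.2.1 x).mp hx).1
    · rintro (rfl | hxt)
      · exact Or.inl rfl
      · by_cases hxv : x = v
        · exact Or.inl hxv
        · exact Or.inr ((h'.2.1 x).mpr ⟨hxt, hxv⟩)

-- A's accumulation loop: nodup, and membership = init ∪ traversed
theorem pvFoldA (l : List String) (acc : List String) (hacc : acc.Nodup) :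
    (l.foldl (fun acc x => if x ∈ acc then acc else acc ++ [x]) acc).Nodup ∧
    ∀ x, x ∈ l.foldl (fun acc x => if x ∈ acc then acc else acc ++ [x]) acc ↔
      x ∈ acc ∨ x ∈ l := by
  induction l generalizing acc with
  | nil => simpa using hacc
  | cons v t ih =>
    by_cases hv : v ∈ acc
    · have ih' := ih acc hacc
      simp only [List.foldl_cons, if_pos hv]
      refine ⟨ih'.1, fun x => ?_⟩
      rw [ih'.2 x]
      constructor
      · rintro (h | h)
        · exact Or.inl h
        · exact Or.inr (by simp [h])
      · rintro (h | h)
        · exact Or.inl h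
        · rcases List.mem_cons.mp h with rfl | h
          · exact Or.inl hv
          · exact Or.inr h
    · have hacc' : (acc ++ [v]).Nodup := by
        refine hacc.append (List.nodup_singleton v) ?_
        intro a ha hav
        rw [List.mem_singleton] at hav
        exact hv (hav ▸ ha)
      have ih' := ih (acc ++ [v]) hacc'
      simp only [List.foldl_cons, if_neg hv]
      refine ⟨ih'.1, fun x => ?_⟩
      rw [ih'.2 x]
      simp only [List.mem_append, List.mem_cons]
      tauto

-- ===== VERDICT (by name: the statement is the Claim_ definition above) =====
theorem create_category_index_spec : Claim_equal_create_category_index := by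
  intro cd _
  unfold Spec_create_category_index create_category_index create_category_index_alt
  dsimp only
  set d := PySem.Dict.ofList cd
  set dedup := d.items.foldl (fun acc p => if p.2 ∈ acc then acc else acc ++ [p.2]) []
    with hdedup
  set ordered := PySem.List.sorted d.values (fun x => x) false with hord
  have hAfold : dedup = d.values.foldl (fun acc x => if x ∈ acc then acc else acc ++ [x]) [] := by
    rw [hdedup, PySem.Dict.values, List.foldl_map]
  have hA := pvFoldA d.values [] (by simp)
  rw [← hAfold] at hA
  have hordP : ordered.Pairwise (fun a b => a ≤ b) :=
    PySem.List.sorted_pairwise d.values (fun x => x)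
  have hB := pvAdj_none_lemma ordered hordP
  have hperm : (pvAdj ordered none).Perm dedup := by
    rw [List.perm_ext_iff_of_nodup (hB.1.imp ne_of_lt) hA.1]
    intro x
    rw [hB.2 x, hA.2 x, PySem.List.mem_sorted]
    simp
  have hsorted : PySem.List.sorted dedup (fun x => x) false = pvAdj ordered none :=
    PySem.List.sorted_eq_of_perm_of_pairwise_lt dedup (pvAdj ordered none) (fun x => x) hperm hB.1
  rw [hsorted, PySem.List.insert_zero, pvFoldB_none]
  rfl
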